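-- pv_equiv track=rewrite | github.com/timonburkard/BiSS_Bridge | 6_tools/calculate_crc.py | calculate_crc6
-- ===== SOURCE A (Python) =====
-- def calculate_crc6(position_data, data_width=22, error_bit=0, warning_bit=0):
--     """
--     Calculate CRC-6 over position bits plus status bits (error, warning).
--     Mirrors the VHDL implementation in 2_hdl/src/data_checker.vhd.
--
--     Args:
--         position_data: Position value as integer
--         data_width: Number of bits in position data (default: 22)
--         error_bit: Decoded error bit (active-high). On the line it is inverted.
--         warning_bit: Decoded warning bit (active-high). On the line it is inverted.
--
--     Returns:
--         CRC remainder (6-bit, non-inverted). To get transmitted bits, invert.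
--     """
--     crc = 0  # 6-bit value
--
--     # Process position bits from MSB to LSB
--     for i in range(data_width-1, -1, -1):
--         bit = (position_data >> i) & 1
--         feedback = bit ^ ((crc >> 5) & 1)
--         crc = (crc << 1) & 0x3F
--         if feedback:
--             crc ^= 0x03  # polynomial without MSB: x^1 + x^0
--
--     # Include status bits in the same order as transmitted: error then warning
--     raw_error = 1 ^ (error_bit & 1)   # raw transmitted bit on SLO = not(decoded)
--     raw_warning = 1 ^ (warning_bit & 1)
--
--     # Error bit
--     feedback = raw_error ^ ((crc >> 5) & 1)
--     crc = (crc << 1) & 0x3F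
--     if feedback:
--         crc ^= 0x03
--
--     # Warning bit
--     feedback = raw_warning ^ ((crc >> 5) & 1)
--     crc = (crc << 1) & 0x3F
--     if feedback:
--         crc ^= 0x03
--
--     return crc & 0x3F
-- ===== SOURCE B (Python) =====
-- # CRC-6 (poly x^6+x+1, init 0) is GF(2)-linear in the transmitted bit stream:
-- # the result is the XOR of a fixed per-position contribution for every 1-bit.
-- # A bit at LSB-offset i of the position field is followed by i+2 further
-- # transmitted bits, so its contribution is 3*x^(i+2) in GF(64); since x
-- # generates GF(64)*, contributions repeat with period 63, so a 63-entry
-- # table covers every offset.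
--
-- _CRC6_TABLE = []
-- _t = 0x03
-- for _ in range(63):
--     _CRC6_TABLE.append(_t)
--     _t = ((_t << 1) & 0x3F) ^ (0x03 if _t & 0x20 else 0)
--
--
-- def calculate_crc6(position_data, data_width=22, error_bit=0, warning_bit=0):
--     crc = 0
--     for i in range(data_width):
--         if (position_data >> i) & 1:
--             crc ^= _CRC6_TABLE[(i + 2) % 63]
--     if not (error_bit & 1):
--         crc ^= _CRC6_TABLE[1]
--     if not (warning_bit & 1):
--         crc ^= _CRC6_TABLE[0]
--     return crc & 0x3F
-- ===== Notes on version B (the rewrite author's own statement) =====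
-- stated objective: faster
-- what changed: Replaces A's MSB-first bit-serial shift-register scan (feedback, shift, conditional polynomial xor per bit) by GF(2)-linearity: a precomputed 63-entry table of per-offset CRC contributions (3*x^(i+2) in GF(64), period 63) is XORed for each set low bit of position_data and for each inverted status bit.
import Mathlib
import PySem

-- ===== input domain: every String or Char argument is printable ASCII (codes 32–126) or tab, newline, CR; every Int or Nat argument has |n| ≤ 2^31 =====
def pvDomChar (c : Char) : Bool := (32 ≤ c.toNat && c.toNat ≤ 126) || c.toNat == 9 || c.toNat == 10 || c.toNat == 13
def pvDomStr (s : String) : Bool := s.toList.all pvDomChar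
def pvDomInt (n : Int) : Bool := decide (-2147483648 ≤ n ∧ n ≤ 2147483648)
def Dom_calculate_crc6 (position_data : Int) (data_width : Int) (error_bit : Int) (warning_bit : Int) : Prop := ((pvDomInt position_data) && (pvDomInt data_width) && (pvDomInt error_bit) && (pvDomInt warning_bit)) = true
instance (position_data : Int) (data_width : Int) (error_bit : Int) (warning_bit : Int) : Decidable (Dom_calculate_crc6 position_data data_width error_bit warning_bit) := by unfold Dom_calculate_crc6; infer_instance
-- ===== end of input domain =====

-- B replaces A's MSB-first shift-register scan by an XOR of precomputed per-bit
-- CRC contributions over the low data_width bits (GF(2)-linearity, 63-entry table).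

-- ===== PORT A =====
-- A-side helper: the shift-xor update A performs for every transmitted bit
-- (A repeats this identical four-line block for the loop body and both status bits)
def pvStepA (crc bit : Int) : Int :=
  let feedback := PySem.Int.bxor bit (PySem.Int.band (crc >>> 5) 1)
  let crc' := PySem.Int.band (crc <<< 1) 63
  if feedback ≠ 0 then PySem.Int.bxor crc' 3 else crc'

def calculate_crc6 (position_data : Int) (data_width : Int) (error_bit : Int) (warning_bit : Int) : Int :=
  -- loop indices from range(data_width-1, -1, -1) are nonnegative, so `i.toNat` is exact
  let crc : Int := (PySem.List.pyRange (data_width - 1) (-1) (-1)).foldl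
    (fun crc i => pvStepA crc (PySem.Int.band (position_data >>> i.toNat) 1)) 0
  let raw_error := PySem.Int.bxor 1 (PySem.Int.band error_bit 1)
  let raw_warning := PySem.Int.bxor 1 (PySem.Int.band warning_bit 1)
  let crc := pvStepA crc raw_error
  let crc := pvStepA crc raw_warning
  PySem.Int.band crc 63

-- ===== PORT B =====
-- B-side: the 63-entry contribution table, built exactly as Source B's module-level loop
def pvTable : List Int :=
  ((List.range 63).foldl
    (fun (st : List Int × Int) _ =>
      (st.1 ++ [st.2],
        PySem.Int.bxor (PySem.Int.band (st.2 <<< 1) 63)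
          (if PySem.Int.band st.2 32 ≠ 0 then 3 else 0)))
    ([], 3)).1

def calculate_crc6_alt (position_data : Int) (data_width : Int) (error_bit : Int) (warning_bit : Int) : Int :=
  -- loop indices from range(data_width) are nonnegative, so `i.toNat` is exact
  let crc : Int := (PySem.List.pyRange 0 data_width 1).foldl
    (fun crc i =>
      if PySem.Int.band (position_data >>> i.toNat) 1 ≠ 0 then
        PySem.Int.bxor crc (PySem.List.pyGetD pvTable (PySem.Int.mod (i + 2) 63) 0)
      else crc) 0
  let crc := if PySem.Int.band error_bit 1 = 0 then
      PySem.Int.bxor crc (PySem.List.pyGetD pvTable 1 0) else crc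
  let crc := if PySem.Int.band warning_bit 1 = 0 then
      PySem.Int.bxor crc (PySem.List.pyGetD pvTable 0 0) else crc
  PySem.Int.band crc 63

-- ===== PRECONDITION & SPEC =====
def Spec_calculate_crc6 (position_data : Int) (data_width : Int) (error_bit : Int) (warning_bit : Int) (out : Int) : Prop := out = calculate_crc6_alt position_data data_width error_bit warning_bit
instance (position_data : Int) (data_width : Int) (error_bit : Int) (warning_bit : Int) (out : Int) : Decidable (Spec_calculate_crc6 position_data data_width error_bit warning_bit out) := by unfold Spec_calculate_crc6; infer_instance

-- ===== CLAIM (what is proved, stated in full; the proofs are below) =====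
def Claim_equal_calculate_crc6 : Prop := ∀ (position_data : Int) (data_width : Int) (error_bit : Int) (warning_bit : Int), Dom_calculate_crc6 position_data data_width error_bit warning_bit → Spec_calculate_crc6 position_data data_width error_bit warning_bit (calculate_crc6 position_data data_width error_bit warning_bit)

-- ===== LEMMAS AND PROOFS =====

-- Abstract model of one zero-bit step and the contribution table  tab d = Z^[d] 3
def pvZ (c : Int) : Int := pvStepA c 0
def pvTab (d : Nat) : Int := pvZ^[d] 3
def pvTabN (r : Nat) : Int := pvTable.getD r 0
def pvBit (p : Int) (i : Nat) : Int := PySem.Int.band (p >>> i) 1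
def pvT (p : Int) (i : Nat) : Int := if pvBit p i ≠ 0 then pvTab (i + 2) else 0
def pvF (p : Int) (n : Nat) : Int :=
  (List.range n).foldl (fun acc i => PySem.Int.bxor acc (pvT p i)) 0
def pvRunA (bs : List Int) (c : Int) : Int := bs.foldl pvStepA c
def pvStream (p : Int) (n : Nat) (re rw : Int) : List Int :=
  (List.range n).map (fun k => pvBit p (n - 1 - k)) ++ [re, rw]
def pvS (re rw : Int) : Int :=
  PySem.Int.bxor (if re ≠ 0 then pvTab 1 else 0) (if rw ≠ 0 then pvTab 0 else 0)

-- xor basics restricted to nonnegative values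
lemma pvZeroX (a : Int) : PySem.Int.bxor 0 a = a := by
  rw [PySem.Int.bxor_comm]; exact PySem.Int.bxor_zero a

lemma pvXassoc {a b c : Int} (ha : 0 ≤ a) (hb : 0 ≤ b) (hc : 0 ≤ c) :
    PySem.Int.bxor (PySem.Int.bxor a b) c = PySem.Int.bxor a (PySem.Int.bxor b c) := by
  rw [PySem.Int.bxor_of_nonneg ha hb, PySem.Int.bxor_of_nonneg hb hc,
      PySem.Int.bxor_of_nonneg (by positivity) hc, PySem.Int.bxor_of_nonneg ha (by positivity)]
  simp [Nat.xor_assoc]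

lemma pvXbound {a b : Int} (ha0 : 0 ≤ a) (ha : a < 64) (hb0 : 0 ≤ b) (hb : b < 64) :
    0 ≤ PySem.Int.bxor a b ∧ PySem.Int.bxor a b < 64 := by
  rw [PySem.Int.bxor_of_nonneg ha0 hb0]
  refine ⟨by positivity, ?_⟩
  have : a.toNat ^^^ b.toNat < 2 ^ 6 := Nat.xor_lt_two_pow (by omega) (by omega)
  omega

lemma pvShuffle {e w f : Int} (he : 0 ≤ e) (hw : 0 ≤ w) (hf : 0 ≤ f) :
    PySem.Int.bxor (PySem.Int.bxor e w) f = PySem.Int.bxor (PySem.Int.bxor f e) w := by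
  rw [pvXassoc he hw hf, PySem.Int.bxor_comm w f, ← pvXassoc he hf hw,
      PySem.Int.bxor_comm e f]

-- transport of Fin-64 decided facts to bounded Ints
lemma pvFin64 {P : Int → Prop} (h : ∀ c : Fin 64, P ↑c.val) {c : Int}
    (h0 : 0 ≤ c) (h1 : c < 64) : P c := by
  have := h ⟨c.toNat, by omega⟩
  simpa [Int.toNat_of_nonneg h0] using this

-- decided single-step facts
set_option maxRecDepth 100000 in
lemma pvZaddF : ∀ c d : Fin 64,
    pvZ (PySem.Int.bxor ↑c.val ↑d.val) = PySem.Int.bxor (pvZ ↑c.val) (pvZ ↑d.val) := by decide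
set_option maxRecDepth 100000 in
lemma pvStep1F : ∀ c : Fin 64, pvStepA ↑c.val 1 = PySem.Int.bxor (pvZ ↑c.val) 3 := by decide
set_option maxRecDepth 100000 in
lemma pvZboundF : ∀ c : Fin 64, 0 ≤ pvZ ↑c.val ∧ pvZ ↑c.val < 64 := by decide
set_option maxRecDepth 100000 in
lemma pvZ63 : pvZ^[63] 3 = 3 := by decide
set_option maxRecDepth 100000 in
lemma pvTabLitF : ∀ r : Fin 63, pvTab r.val = pvTabN r.val := by decide

lemma pvZ_add {c d : Int} (hc0 : 0 ≤ c) (hc : c < 64) (hd0 : 0 ≤ d) (hd : d < 64) :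
    pvZ (PySem.Int.bxor c d) = PySem.Int.bxor (pvZ c) (pvZ d) := by
  refine pvFin64 (P := fun c => ∀ d : Int, 0 ≤ d → d < 64 →
      pvZ (PySem.Int.bxor c d) = PySem.Int.bxor (pvZ c) (pvZ d)) ?_ hc0 hc d hd0 hd
  intro cf d hd0 hd
  exact pvFin64 (P := fun d => pvZ (PySem.Int.bxor ↑cf.val d) = PySem.Int.bxor (pvZ ↑cf.val) (pvZ d))
    (fun df => pvZaddF cf df) hd0 hd

lemma pvZ_bound {c : Int} (h0 : 0 ≤ c) (h1 : c < 64) : 0 ≤ pvZ c ∧ pvZ c < 64 :=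
  pvFin64 (P := fun c => 0 ≤ pvZ c ∧ pvZ c < 64) pvZboundF h0 h1

lemma pvStep_bit {c : Int} (h0 : 0 ≤ c) (h1 : c < 64) {b : Int} (hb : b = 0 ∨ b = 1) :
    pvStepA c b = PySem.Int.bxor (pvZ c) (if b ≠ 0 then 3 else 0) := by
  rcases hb with hb | hb <;> subst hb
  · simp only [ne_eq, not_true_eq_false, if_false]
    rw [PySem.Int.bxor_zero]; rfl
  · simp only [ne_eq, one_ne_zero, not_false_eq_true, if_true]
    exact pvFin64 (P := fun c => pvStepA c 1 = PySem.Int.bxor (pvZ c) 3) pvStep1F h0 h1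

lemma pvStep_bound {c : Int} (h0 : 0 ≤ c) (h1 : c < 64) {b : Int} (hb : b = 0 ∨ b = 1) :
    0 ≤ pvStepA c b ∧ pvStepA c b < 64 := by
  rw [pvStep_bit h0 h1 hb]
  have hz := pvZ_bound h0 h1
  refine pvXbound hz.1 hz.2 ?_ ?_ <;> split <;> omega

lemma pvTab_bound : ∀ d : Nat, 0 ≤ pvTab d ∧ pvTab d < 64 := by
  intro d; induction d with
  | zero => exact ⟨by norm_num [pvTab], by norm_num [pvTab]⟩
  | succ d ih =>
    unfold pvTab at *
    rw [Function.iterate_succ_apply']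
    exact pvZ_bound ih.1 ih.2

lemma pvTab_add63 (d : Nat) : pvTab (d + 63) = pvTab d := by
  unfold pvTab
  rw [Function.iterate_add_apply, pvZ63]

lemma pvTab_mod : ∀ d : Nat, pvTab d = pvTab (d % 63) := by
  intro d
  induction d using Nat.strong_induction_on with
  | _ d ih =>
    by_cases h : d < 63
    · rw [Nat.mod_eq_of_lt h]
    · have hd : d = (d - 63) + 63 := by omega
      rw [hd, pvTab_add63, ih (d - 63) (by omega)]
      congr 1; omega

lemma pvTab_eq_tabN (d : Nat) : pvTab d = pvTabN (d % 63) := by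
  rw [pvTab_mod]
  exact pvTabLitF ⟨d % 63, Nat.mod_lt _ (by norm_num)⟩

lemma pvBit01 (p : Int) (i : Nat) : pvBit p i = 0 ∨ pvBit p i = 1 := by
  unfold pvBit
  rw [PySem.Int.band_one]
  have h1 := PySem.Int.mod_nonneg (p >>> i) (b := 2) (by norm_num)
  have h2 := PySem.Int.mod_lt (p >>> i) (b := 2) (by norm_num)
  omega

lemma pvT_bound (p : Int) (i : Nat) : 0 ≤ pvT p i ∧ pvT p i < 64 := by
  unfold pvT; split
  · exact pvTab_bound _
  · norm_num

lemma pvF_succ (p : Int) (n : Nat) :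
    pvF p (n + 1) = PySem.Int.bxor (pvF p n) (pvT p n) := by
  unfold pvF
  rw [List.range_succ, List.foldl_append]
  rfl

lemma pvF_bound (p : Int) : ∀ n : Nat, 0 ≤ pvF p n ∧ pvF p n < 64 := by
  intro n; induction n with
  | zero => norm_num [pvF]
  | succ n ih =>
    rw [pvF_succ]
    have ht := pvT_bound p n
    exact pvXbound ih.1 ih.2 ht.1 ht.2

lemma pvRunA_linear : ∀ bs : List Int, (∀ b ∈ bs, b = 0 ∨ b = 1) → ∀ c d : Int,
    0 ≤ c → c < 64 → 0 ≤ d → d < 64 →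
    pvRunA bs (PySem.Int.bxor c d) = PySem.Int.bxor (pvRunA bs c) (pvZ^[bs.length] d) := by
  intro bs
  induction bs with
  | nil => intro _ c d _ _ _ _; rfl
  | cons b bs ih =>
    intro hmem c d hc0 hc hd0 hd
    have hb : b = 0 ∨ b = 1 := hmem b (by simp)
    have hX := pvXbound hc0 hc hd0 hd
    have hzc := pvZ_bound hc0 hc
    have hzd := pvZ_bound hd0 hd
    have hb3 : (0:Int) ≤ (if b ≠ 0 then 3 else 0) ∧ (if b ≠ 0 then (3:Int) else 0) < 64 := by
      split <;> norm_num
    have hstep : pvStepA (PySem.Int.bxor c d) b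
        = PySem.Int.bxor (pvStepA c b) (pvZ d) := by
      rw [pvStep_bit hX.1 hX.2 hb, pvZ_add hc0 hc hd0 hd,
          pvXassoc hzc.1 hzd.1 hb3.1, PySem.Int.bxor_comm (pvZ d),
          ← pvXassoc hzc.1 hb3.1 hzd.1, ← pvStep_bit hc0 hc hb]
    have hsb := pvStep_bound hc0 hc hb
    show pvRunA bs (pvStepA (PySem.Int.bxor c d) b)
        = PySem.Int.bxor (pvRunA bs (pvStepA c b)) (pvZ^[(b :: bs).length] d)
    rw [hstep, ih (fun x hx => hmem x (by simp [hx])) _ _ hsb.1 hsb.2 hzd.1 hzd.2,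
        List.length_cons, Function.iterate_succ_apply]

lemma pvRunA_shift (bs : List Int) (hmem : ∀ b ∈ bs, b = 0 ∨ b = 1) {d : Int}
    (hd0 : 0 ≤ d) (hd : d < 64) :
    pvRunA bs d = PySem.Int.bxor (pvRunA bs 0) (pvZ^[bs.length] d) := by
  have := pvRunA_linear bs hmem 0 d le_rfl (by norm_num) hd0 hd
  rwa [pvZeroX] at this

lemma pvStream_succ (p : Int) (n : Nat) (re rw : Int) :
    pvStream p (n + 1) re rw = pvBit p n :: pvStream p n re rw := by
  unfold pvStream
  rw [List.range_succ_eq_map, List.map_cons, List.map_map]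
  simp only [Nat.add_sub_cancel, Nat.sub_zero, List.cons_append]
  congr 2
  refine List.map_congr_left ?_
  intro k _
  simp only [Function.comp_apply, Nat.succ_eq_add_one]
  congr 1
  omega

lemma pvStream_mem {re rw : Int} (hre : re = 0 ∨ re = 1) (hrw : rw = 0 ∨ rw = 1)
    (p : Int) (n : Nat) : ∀ b ∈ pvStream p n re rw, b = 0 ∨ b = 1 := by
  intro b hb
  unfold pvStream at hb
  rcases List.mem_append.mp hb with h | h
  · obtain ⟨k, _, hk⟩ := List.mem_map.mp h
    exact hk ▸ pvBit01 p _
  · have : b = re ∨ b = rw := by simpa using h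
    rcases this with h' | h'
    · exact h' ▸ hre
    · exact h' ▸ hrw

lemma pvStream_len (p : Int) (n : Nat) (re rw : Int) :
    (pvStream p n re rw).length = n + 2 := by
  simp [pvStream]

lemma pvS_bound (re rw : Int) : 0 ≤ pvS re rw ∧ pvS re rw < 64 := by
  unfold pvS
  have h1 : (0:Int) ≤ (if re ≠ 0 then pvTab 1 else 0) ∧ (if re ≠ 0 then pvTab 1 else 0) < 64 := by
    split; · exact pvTab_bound 1
    · norm_num
  have h2 : (0:Int) ≤ (if rw ≠ 0 then pvTab 0 else 0) ∧ (if rw ≠ 0 then pvTab 0 else 0) < 64 := by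
    split; · exact pvTab_bound 0
    · norm_num
  exact pvXbound h1.1 h1.2 h2.1 h2.2

lemma pvRunA_stream {re rw : Int} (hre : re = 0 ∨ re = 1) (hrw : rw = 0 ∨ rw = 1)
    (p : Int) : ∀ n : Nat,
    pvRunA (pvStream p n re rw) 0 = PySem.Int.bxor (pvS re rw) (pvF p n) := by
  intro n
  induction n with
  | zero =>
    simp only [pvStream, pvF, List.range_zero, List.map_nil, List.nil_append, List.foldl_nil,
      PySem.Int.bxor_zero]
    rcases hre with h | h <;> rcases hrw with h' | h' <;> subst h h' <;> decide
  | succ n ih =>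
    rw [pvStream_succ]
    rcases pvBit01 p n with hb | hb
    · show pvRunA (pvStream p n re rw) (pvStepA 0 (pvBit p n))
          = PySem.Int.bxor (pvS re rw) (pvF p (n + 1))
      rw [hb]
      have : pvStepA 0 0 = 0 := by decide
      rw [this, pvF_succ]
      have ht : pvT p n = 0 := by unfold pvT; rw [hb]; simp
      rw [ht, PySem.Int.bxor_zero]
      exact ih
    · show pvRunA (pvStream p n re rw) (pvStepA 0 (pvBit p n))
          = PySem.Int.bxor (pvS re rw) (pvF p (n + 1))
      rw [hb]
      have h3 : pvStepA 0 1 = 3 := by decide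
      rw [h3, pvRunA_shift _ (pvStream_mem hre hrw p n) (by norm_num) (by norm_num),
          pvStream_len, ih]
      rw [show pvZ^[n + 2] 3 = pvTab (n + 2) from rfl]
      have hS := pvS_bound re rw
      have hF := pvF_bound p n
      have hT := pvTab_bound (n + 2)
      rw [pvXassoc hS.1 hF.1 hT.1]
      congr 1
      rw [pvF_succ]
      congr 1
      unfold pvT
      rw [hb]
      norm_num

-- A's loop list is the descending bit list of the stream
lemma pvRange_down (dw : Int) :
    PySem.List.pyRange (dw - 1) (-1) (-1)
      = (List.range dw.toNat).map (fun k : Nat => dw - 1 - (k : Int)) := by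
  unfold PySem.List.pyRange
  norm_num
  rw [show (if 0 < dw then dw.toNat else 0) = dw.toNat by split <;> omega]
  refine List.map_congr_left ?_
  intro k _
  ring

lemma pvBand01 (e : Int) : PySem.Int.band e 1 = 0 ∨ PySem.Int.band e 1 = 1 := by
  rw [PySem.Int.band_one]
  have h1 := PySem.Int.mod_nonneg e (b := 2) (by norm_num)
  have h2 := PySem.Int.mod_lt e (b := 2) (by norm_num)
  omega

lemma pvRE01 (e : Int) :
    PySem.Int.bxor 1 (PySem.Int.band e 1) = 0 ∨ PySem.Int.bxor 1 (PySem.Int.band e 1) = 1 := by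
  rcases pvBand01 e with h | h <;> rw [h] <;> [right; left] <;> decide

lemma pvA_eq (p dw e w : Int) :
    calculate_crc6 p dw e w
      = PySem.Int.band (PySem.Int.bxor
          (pvS (PySem.Int.bxor 1 (PySem.Int.band e 1)) (PySem.Int.bxor 1 (PySem.Int.band w 1)))
          (pvF p dw.toNat)) 63 := by
  unfold calculate_crc6
  dsimp only
  rw [pvRange_down, List.foldl_map]
  set n := dw.toNat with hn
  have hfold : (List.range n).foldl
      (fun crc (k : Nat) => pvStepA crc (PySem.Int.band (p >>> ((dw - 1 - (k : Int)).toNat : Int)) 1)) 0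
      = pvRunA ((List.range n).map (fun k => pvBit p (n - 1 - k))) 0 := by
    unfold pvRunA
    rw [List.foldl_map]
    refine PySem.List.foldl_congr_mem _ _ _ _ ?_
    intro acc k hk
    have hk' : k < n := List.mem_range.mp hk
    have ht : (dw - 1 - (k : Int)).toNat = n - 1 - k := by omega
    simp only [pvBit, ht, Int.shiftRight_natCast_right]
  rw [hfold]
  have happ : pvStepA (pvStepA (pvRunA ((List.range n).map fun k => pvBit p (n - 1 - k)) 0)
        (PySem.Int.bxor 1 (PySem.Int.band e 1))) (PySem.Int.bxor 1 (PySem.Int.band w 1))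
      = pvRunA (pvStream p n (PySem.Int.bxor 1 (PySem.Int.band e 1))
          (PySem.Int.bxor 1 (PySem.Int.band w 1))) 0 := by
    unfold pvStream pvRunA
    rw [List.foldl_append]
    rfl
  rw [happ, pvRunA_stream (pvRE01 e) (pvRE01 w)]

lemma pvIfPush (c : Prop) [Decidable c] (acc T : Int) :
    (if c then PySem.Int.bxor acc T else acc) = PySem.Int.bxor acc (if c then T else 0) := by
  split
  · rfl
  · exact (PySem.Int.bxor_zero acc).symm

lemma pvB_eq (p dw e w : Int) :
    calculate_crc6_alt p dw e w
      = PySem.Int.band (PySem.Int.bxor (PySem.Int.bxor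
          (pvF p dw.toNat)
          (if PySem.Int.band e 1 = 0 then pvTabN 1 else 0))
          (if PySem.Int.band w 1 = 0 then pvTabN 0 else 0)) 63 := by
  unfold calculate_crc6_alt
  dsimp only
  have hrange : PySem.List.pyRange 0 dw 1
      = (List.range dw.toNat).map (fun k : Nat => (k : Int)) := by
    rw [PySem.List.pyRange_one]
    norm_num
  rw [hrange, List.foldl_map]
  have hloop : (List.range dw.toNat).foldl
      (fun crc (j : Nat) =>
        if PySem.Int.band (p >>> (((j : Int)).toNat : Int)) 1 ≠ 0 then
          PySem.Int.bxor crc (PySem.List.pyGetD pvTable (PySem.Int.mod ((j : Int) + 2) 63) 0)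
        else crc) 0 = pvF p dw.toNat := by
    unfold pvF
    refine PySem.List.foldl_congr_mem _ _ _ _ ?_
    intro acc j _
    have h2 : ((j : Int)).toNat = j := Int.toNat_natCast j
    have h3 : PySem.Int.mod ((j : Int) + 2) 63 = (((j + 2) % 63 : Nat) : Int) := by
      rw [show ((j : Int) + 2) = (((j + 2 : Nat)) : Int) by push_cast; ring,
          show (63 : Int) = ((63 : Nat) : Int) by norm_num, PySem.Int.mod_natCast]
    rw [h2, h3, PySem.List.pyGetD_natCast,
        show pvTable.getD ((j + 2) % 63) 0 = pvTabN ((j + 2) % 63) from rfl,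
        ← pvTab_eq_tabN]
    unfold pvT pvBit
    rw [Int.shiftRight_natCast_right]
    split
    · rfl
    · exact (PySem.Int.bxor_zero acc).symm
  rw [hloop]
  have hE : PySem.List.pyGetD pvTable 1 0 = pvTabN 1 := by decide
  have hWt : PySem.List.pyGetD pvTable 0 0 = pvTabN 0 := by decide
  rw [hE, hWt, pvIfPush, pvIfPush]

lemma pvTabN_bound63 {r : Nat} (h : r < 63) : 0 ≤ pvTabN r ∧ pvTabN r < 64 := by
  rw [← pvTabLitF ⟨r, h⟩]
  exact pvTab_bound r

lemma pvMain (p dw e w : Int) : calculate_crc6 p dw e w = calculate_crc6_alt p dw e w := by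
  rw [pvA_eq, pvB_eq]
  congr 1
  have hE : (if PySem.Int.bxor 1 (PySem.Int.band e 1) ≠ 0 then pvTab 1 else 0)
      = (if PySem.Int.band e 1 = 0 then pvTabN 1 else 0) := by
    rcases pvBand01 e with h | h <;> rw [h] <;> decide
  have hW' : (if PySem.Int.bxor 1 (PySem.Int.band w 1) ≠ 0 then pvTab 0 else 0)
      = (if PySem.Int.band w 1 = 0 then pvTabN 0 else 0) := by
    rcases pvBand01 w with h | h <;> rw [h] <;> decide
  have hEb : (0:Int) ≤ (if PySem.Int.band e 1 = 0 then pvTabN 1 else 0)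
      ∧ (if PySem.Int.band e 1 = 0 then pvTabN 1 else 0) < 64 := by
    split; · exact pvTabN_bound63 (by norm_num)
    · norm_num
  have hWb : (0:Int) ≤ (if PySem.Int.band w 1 = 0 then pvTabN 0 else 0)
      ∧ (if PySem.Int.band w 1 = 0 then pvTabN 0 else 0) < 64 := by
    split; · exact pvTabN_bound63 (by norm_num)
    · norm_num
  have hFb := pvF_bound p dw.toNat
  unfold pvS
  rw [hE, hW']
  exact pvShuffle hEb.1 hWb.1 hFb.1

-- ===== VERDICT (by name: the statement is the Claim_ definition above) =====
theorem calculate_crc6_spec : Claim_equal_calculate_crc6 := by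
  intro p dw e w _
  show calculate_crc6 p dw e w = calculate_crc6_alt p dw e w
  exact pvMain p dw e w
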